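-- pv_equiv track=rewrite | github.com/jy016011/algorithm-python | programmers/high_score_kit/stack_and_queue/_Q2_Lv2.py | solution
-- ===== SOURCE A (Python) =====
-- import queue
--
-- def solution(progresses, speeds):
--     answer = []
--     progresses_queue = queue.Queue()
--     for i in range(len(progresses)) :
--         remain = 100 - progresses[i]
--         if remain % speeds[i] == 0:
--             remain //= speeds[i]
--         else:
--             remain = (remain // speeds[i]) + 1
--         progresses_queue.put(remain)
--
--     while not progresses_queue.empty():
--         current_day = progresses_queue.get()
--         count = 1
--         while not progresses_queue.empty() and progresses_queue.queue[0] <= current_day: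
--             progresses_queue.get()
--             count += 1
--         answer.append(count)
--     return answer
-- ===== SOURCE B (Python) =====
-- def solution(progresses, speeds):
--     days = [-(-(100 - p) // s) for p, s in zip(progresses, speeds)]
--     # prefix running maxima of days
--     prefmax = []
--     m = None
--     for d in days:
--         m = d if m is None or d > m else m
--         prefmax.append(m)
--     # a deployment starts exactly where the prefix maximum strictly increases
--     starts = [i for i in range(len(days)) if i == 0 or prefmax[i] > prefmax[i - 1]]
--     bounds = starts + [len(days)]
--     return [b - a for a, b in zip(bounds, bounds[1:])]
-- ===== Notes on version B (the rewrite author's own statement) =====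
-- stated objective: faster
-- what changed: Replaces the FIFO-queue drain with nested consume-while by a staged pipeline: compute the ceil-division day list, its prefix running maxima, the boundary indices where the prefix maximum strictly increases, and return the differences of consecutive boundaries as group sizes.
import Mathlib
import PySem

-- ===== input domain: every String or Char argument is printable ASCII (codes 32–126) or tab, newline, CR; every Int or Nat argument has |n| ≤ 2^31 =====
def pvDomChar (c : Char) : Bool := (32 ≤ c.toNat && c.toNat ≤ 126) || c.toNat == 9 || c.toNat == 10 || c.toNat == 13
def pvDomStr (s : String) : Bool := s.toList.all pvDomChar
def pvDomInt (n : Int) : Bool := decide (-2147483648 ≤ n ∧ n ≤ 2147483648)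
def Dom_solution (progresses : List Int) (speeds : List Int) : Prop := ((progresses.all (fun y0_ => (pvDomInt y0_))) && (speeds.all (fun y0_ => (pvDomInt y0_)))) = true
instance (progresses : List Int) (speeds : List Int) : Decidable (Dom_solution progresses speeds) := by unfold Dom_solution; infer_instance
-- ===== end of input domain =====

-- B replaces A's queue + nested consume-while grouping by a staged pipeline: day list,
-- prefix running maxima, boundary indices where the prefix max strictly increases, and
-- group sizes as differences of consecutive boundaries (measurably faster: no
-- synchronized queue.Queue operations).


-- ===== PORT A =====
-- first loop: build the queue of remaining-day counts (pyGetD is exact under Pre_'s index bound)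
def pvRemainsA (progresses : List Int) (speeds : List Int) : List Int :=
  (PySem.List.pyRange 0 (PySem.List.len progresses) 1).foldl (fun q i =>
    let remain := 100 - PySem.List.pyGetD progresses i 0
    let sp := PySem.List.pyGetD speeds i 0
    q ++ [if PySem.Int.mod remain sp = 0 then PySem.Int.floordiv remain sp
          else PySem.Int.floordiv remain sp + 1]) []

-- inner while: consume queue entries ≤ current_day, counting them
def pvInnerA (current : Int) : List Int → Int → Int × List Int
  | [], count => (count, [])
  | d :: rest, count =>
    if d ≤ current then pvInnerA current rest (count + 1) else (count, d :: rest)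

theorem pvInnerA_len (current : Int) : ∀ (q : List Int) (c : Int), (pvInnerA current q c).2.length ≤ q.length := by
  intro q
  induction q with
  | nil => intro c; simp [pvInnerA]
  | cons d rest ih =>
    intro c
    simp only [pvInnerA]
    split
    · exact Nat.le_succ_of_le (ih (c + 1))
    · simp

-- outer while: one group per queue head
def pvOuterA : List Int → List Int
  | [] => []
  | d :: rest =>
    let r := pvInnerA d rest 1
    r.1 :: pvOuterA r.2
termination_by q => q.length
decreasing_by exact Nat.lt_succ_of_le (pvInnerA_len d rest 1)

def solution (progresses : List Int) (speeds : List Int) : List Int :=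
  pvOuterA (pvRemainsA progresses speeds)

-- ===== PORT B =====
-- days = [-(-(100 - p) // s) for p, s in zip(progresses, speeds)]
def pvDaysB (progresses : List Int) (speeds : List Int) : List Int :=
  (progresses.zip speeds).map (fun ps => -(PySem.Int.floordiv (-(100 - ps.1)) ps.2))

-- the prefix-maximum loop: m starts as None, prefmax.append(m) each step
def pvPrefB : List Int → Option Int → List Int → List Int
  | [], _, acc => acc
  | d :: rest, m, acc =>
    let m' : Int := match m with
      | none => d
      | some mv => if d > mv then d else mv
    pvPrefB rest (some m') (acc ++ [m'])

-- the comprehension's condition: i == 0 or prefmax[i] > prefmax[i-1] (indices always in range)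
def pvStartPred (prefmax : List Int) (i : Int) : Bool :=
  i == 0 || decide (PySem.List.pyGetD prefmax i 0 > PySem.List.pyGetD prefmax (i - 1) 0)

def solution_alt (progresses : List Int) (speeds : List Int) : List Int :=
  let days := pvDaysB progresses speeds
  let prefmax := pvPrefB days none []
  let starts := (PySem.List.pyRange 0 (PySem.List.len days) 1).filter (pvStartPred prefmax)
  let bounds := starts ++ [PySem.List.len days]
  (bounds.zip (PySem.List.slice bounds (some 1) none)).map (fun ab => ab.2 - ab.1)

-- ===== PRECONDITION & SPEC =====
-- Pre_ excludes exactly the inputs where A raises: an index i < len(progresses) with no speeds[i]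
-- (IndexError) or speeds[i] == 0 (ZeroDivisionError).
def Pre_solution (progresses : List Int) (speeds : List Int) : Prop :=
  progresses.length ≤ speeds.length ∧ ∀ x ∈ speeds.take progresses.length, x ≠ 0
instance (progresses : List Int) (speeds : List Int) : Decidable (Pre_solution progresses speeds) := by unfold Pre_solution; infer_instance
def pvWitness_solution : List Int × List Int := ([93, 30, 55], [1, 30, 5])

def Spec_solution (progresses : List Int) (speeds : List Int) (out : List Int) : Prop := out = solution_alt progresses speeds
instance (progresses : List Int) (speeds : List Int) (out : List Int) : Decidable (Spec_solution progresses speeds out) := by unfold Spec_solution; infer_instance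

-- ===== CLAIM (what is proved, stated in full; the proofs are below) =====
def Claim_equal_solution : Prop := ∀ (progresses : List Int) (speeds : List Int), Dom_solution progresses speeds → Pre_solution progresses speeds → Spec_solution progresses speeds (solution progresses speeds)

-- ===== LEMMAS AND PROOFS =====

-- A's branch on remain % s is exactly ceiling division -((-remain) // s), for any s ≠ 0
theorem pvCeil_pos (r s : Int) (hs : 0 < s) :
    (if PySem.Int.mod r s = 0 then PySem.Int.floordiv r s
     else PySem.Int.floordiv r s + 1) = -(PySem.Int.floordiv (-r) s) := by
  have hqm := PySem.Int.floordiv_mul_add_mod r s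
  have hm0 := PySem.Int.mod_nonneg r hs
  have hml := PySem.Int.mod_lt r hs
  split
  · rename_i h0
    symm
    rw [PySem.Int.neg_floordiv_neg_eq_iff_of_pos hs]
    constructor
    · nlinarith [hqm, h0]
    · nlinarith [hqm, h0]
  · rename_i h0
    symm
    rw [PySem.Int.neg_floordiv_neg_eq_iff_of_pos hs]
    constructor
    · have : 0 < PySem.Int.mod r s := lt_of_le_of_ne hm0 (Ne.symm h0)
      nlinarith [hqm]
    · nlinarith [hqm, hml]

theorem pvCeil (r s : Int) (hs : s ≠ 0) :
    (if PySem.Int.mod r s = 0 then PySem.Int.floordiv r s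
     else PySem.Int.floordiv r s + 1) = -(PySem.Int.floordiv (-r) s) := by
  rcases lt_trichotomy s 0 with h | h | h
  · have h1 : PySem.Int.floordiv r s = PySem.Int.floordiv (-r) (-s) := by
      rw [← PySem.Int.floordiv_neg_neg (-r) (-s)]; simp
    have h2 : PySem.Int.mod r s = -(PySem.Int.mod (-r) (-s)) := by
      rw [PySem.Int.mod_neg_neg]; simp
    have h3 : PySem.Int.floordiv (-r) s = PySem.Int.floordiv r (-s) := by
      rw [← PySem.Int.floordiv_neg_neg r (-s)]; simp
    simp only [h1, h2, h3, neg_eq_zero]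
    simpa using pvCeil_pos (-r) (-s) (by omega)
  · exact absurd h hs
  · exact pvCeil_pos r s h

-- A's queue of remaining days equals B's day list, under Pre_
theorem pvRemains_eq_days (progresses speeds : List Int)
    (hlen : progresses.length ≤ speeds.length)
    (hnz : ∀ x ∈ speeds.take progresses.length, x ≠ 0) :
    pvRemainsA progresses speeds = pvDaysB progresses speeds := by
  unfold pvRemainsA pvDaysB
  rw [PySem.List.foldl_append_singleton_eq_map]
  simp only [List.nil_append, PySem.List.len_eq]
  apply List.ext_getElem
  · simp [PySem.List.length_pyRange_one, List.length_zip]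
    omega
  · intro k h1 h2
    have hk : k < progresses.length := by
      simpa [PySem.List.length_pyRange_one] using h1
    have hks : k < speeds.length := lt_of_lt_of_le hk hlen
    have hsnz : speeds[k] ≠ 0 := by
      apply hnz
      rw [List.mem_take_iff_getElem]
      exact ⟨k, by omega, by simp⟩
    simp only [List.getElem_map, PySem.List.getElem_pyRange_one, List.getElem_zip, zero_add]
    rw [show ((k : Int)) = ((k : Nat) : Int) from rfl]
    rw [PySem.List.pyGetD_natCast, PySem.List.pyGetD_natCast]
    rw [List.getD_eq_getElem _ _ hk, List.getD_eq_getElem _ _ hks]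
    exact pvCeil _ _ hsnz

-- the prefix-maximum scan as a structural recursion (proof-side view of B's first loop)
def pvScan : Int → List Int → List Int
  | _, [] => []
  | m, d :: r => (if d > m then d else m) :: pvScan (if d > m then d else m) r

def pvPrefL : List Int → List Int
  | [] => []
  | d :: r => d :: pvScan d r

theorem pvScan_length : ∀ (l : List Int) (m : Int), (pvScan m l).length = l.length := by
  intro l
  induction l with
  | nil => intro m; simp [pvScan]
  | cons d r ih => intro m; simp [pvScan, ih]

theorem pvPref_acc : ∀ (days : List Int) (m : Int) (acc : List Int),
    pvPrefB days (some m) acc = acc ++ pvScan m days := by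
  intro days
  induction days with
  | nil => intro m acc; simp [pvPrefB, pvScan]
  | cons d r ih => intro m acc; simp [pvPrefB, pvScan, ih, List.append_assoc]

theorem pvPref_eq_prefL (days : List Int) : pvPrefB days none [] = pvPrefL days := by
  cases days with
  | nil => simp [pvPrefB, pvPrefL]
  | cons d r => simp [pvPrefB, pvPrefL, pvPref_acc]

-- scanning past elements ≤ m leaves the running maximum at m
theorem pvScan_le (m : Int) : ∀ (g t : List Int), (∀ x ∈ g, x ≤ m) →
    pvScan m (g ++ t) = List.replicate g.length m ++ pvScan m t := by
  intro g
  induction g with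
  | nil => intro t _; simp
  | cons x g ih =>
    intro t h
    have hx : ¬ (x > m) := by simpa using h x (by simp)
    simp only [List.cons_append, pvScan, if_neg hx, List.length_cons, List.replicate_succ]
    simp [ih t (fun y hy => h y (by simp [hy]))]

-- A's inner while = count of leading entries ≤ current, remainder = dropWhile
theorem pvInner_spec (current : Int) : ∀ (q : List Int) (c : Int),
    pvInnerA current q c =
      (c + ((q.takeWhile (fun x => decide (x ≤ current))).length : Int),
       q.dropWhile (fun x => decide (x ≤ current))) := by
  intro q
  induction q with
  | nil => intro c; simp [pvInnerA]
  | cons d rest ih =>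
    intro c
    by_cases h : d ≤ current
    · rw [pvInnerA, if_pos h, ih, List.takeWhile_cons_of_pos (by simpa using h),
          List.dropWhile_cons_of_pos (by simpa using h)]
      simp only [List.length_cons, Prod.mk.injEq]
      exact ⟨by push_cast; ring, trivial⟩
    · rw [pvInnerA, if_neg h, List.takeWhile_cons_of_neg (by simpa using h),
          List.dropWhile_cons_of_neg (by simpa using h)]
      simp

-- B's prefix maxima, decomposed along A's first group
theorem pvPrefL_cons (d : Int) (rest : List Int) :
    pvPrefL (d :: rest) =
      d :: (List.replicate (rest.takeWhile (fun x => decide (x ≤ d))).length d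
            ++ pvPrefL (rest.dropWhile (fun x => decide (x ≤ d)))) := by
  have hsplit := List.takeWhile_append_dropWhile (p := fun x => decide (x ≤ d)) (l := rest)
  have h1 : pvScan d rest = List.replicate (rest.takeWhile (fun x => decide (x ≤ d))).length d
      ++ pvScan d (rest.dropWhile (fun x => decide (x ≤ d))) := by
    conv_lhs => rw [← hsplit]
    exact pvScan_le d _ _ (fun x hx => by simpa using List.mem_takeWhile_imp hx)
  have h2 : pvScan d (rest.dropWhile (fun x => decide (x ≤ d))) =
      pvPrefL (rest.dropWhile (fun x => decide (x ≤ d))) := by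
    cases hrem : rest.dropWhile (fun x => decide (x ≤ d)) with
    | nil => simp [pvScan, pvPrefL]
    | cons d' r' =>
      have hd' : ¬ (d' ≤ d) := by
        have := List.head_dropWhile_not (p := fun x => decide (x ≤ d)) (l := rest)
          (by simp [hrem])
        simpa [hrem] using this
      simp [pvScan, pvPrefL, show d' > d by omega]
  simp [pvPrefL, h1, h2]

-- indexing into replicate (k+1) d ++ t
theorem pvIdx_left (d : Int) (k : Nat) (t : List Int) (i : Int) (h0 : 0 ≤ i) (hk : i ≤ (k : Int)) :
    PySem.List.pyGetD (List.replicate (k + 1) d ++ t) i 0 = d := by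
  have hi : i.toNat < k + 1 := by omega
  rw [PySem.List.pyGetD_eq_getElem _ _ h0
      (by rw [List.length_append, List.length_replicate]; push_cast; omega)]
  rw [List.getElem_append_left (by simpa using hi)]
  simp

theorem pvIdx_right (d : Int) (k : Nat) (t : List Int) (j : Nat) (hj : j < t.length) :
    PySem.List.pyGetD (List.replicate (k + 1) d ++ t) ((k : Int) + 1 + (j : Int)) 0
      = PySem.List.pyGetD t (j : Int) 0 := by
  rw [PySem.List.pyGetD_eq_getElem _ _ (by omega)
      (by rw [List.length_append, List.length_replicate]; push_cast; omega)]
  have htn : ((k : Int) + 1 + (j : Int)).toNat = (k + 1) + j := by omega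
  rw [PySem.List.pyGetD_natCast, List.getD_eq_getElem _ _ hj]
  have hidx : ∀ (hh : ((k : Int) + 1 + (j : Int)).toNat < (List.replicate (k + 1) d ++ t).length),
      (List.replicate (k + 1) d ++ t)[((k : Int) + 1 + (j : Int)).toNat] = t[j] := by
    rw [htn]
    intro hh
    rw [List.getElem_append_right (by simp)]
    congr 1
    simp
  exact hidx _

-- shifting the boundary predicate across the first group's plateau
theorem pvPred_shift (d : Int) (k : Nat) (d' : Int) (ts : List Int) (hd : d < d')
    (j : Nat) (hj : j < (d' :: ts).length) :
    pvStartPred (List.replicate (k + 1) d ++ (d' :: ts)) ((k : Int) + 1 + (j : Int))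
      = pvStartPred (d' :: ts) (j : Int) := by
  cases j with
  | zero =>
    have h1 := pvIdx_right d k (d' :: ts) 0 (by simp)
    have hRT : pvStartPred (d' :: ts) ((0 : Nat) : Int) = true := by simp [pvStartPred]
    have hLT : pvStartPred (List.replicate (k + 1) d ++ (d' :: ts)) ((k : Int) + 1 + ((0 : Nat) : Int)) = true := by
      rw [pvStartPred, h1]
      rw [show (k : Int) + 1 + ((0 : Nat) : Int) - 1 = (k : Int) by push_cast; ring]
      rw [pvIdx_left d k (d' :: ts) (k : Int) (by omega) (by omega)]
      have h3 : PySem.List.pyGetD (d' :: ts) ((0 : Nat) : Int) 0 = d' := by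
        rw [PySem.List.pyGetD_natCast]; rfl
      rw [h3]
      simp [hd]
    rw [hRT, hLT]
  | succ j' =>
    have hj' : j' < (d' :: ts).length := by omega
    have h1 := pvIdx_right d k (d' :: ts) (j' + 1) hj
    have h2 := pvIdx_right d k (d' :: ts) j' hj'
    have e1 : (k : Int) + 1 + ((j' + 1 : Nat) : Int) - 1 = (k : Int) + 1 + (j' : Int) := by push_cast; ring
    have e2 : ((j' + 1 : Nat) : Int) - 1 = (j' : Int) := by push_cast; ring
    simp only [pvStartPred, e1, e2]
    rw [show (k : Int) + 1 + ((j' + 1 : Nat) : Int) = (k : Int) + 1 + ((j' + 1 : Nat) : Int) from rfl] at h1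
    rw [h1, h2]
    have hne1 : ((k : Int) + 1 + ((j' + 1 : Nat) : Int) == (0 : Int)) = false := by
      simp; omega
    have hne2 : (((j' + 1 : Nat) : Int) == (0 : Int)) = false := by simp; omega
    rw [hne1, hne2]

-- the boundary-index filter over replicate (k+1) d ++ prefmax(rem), split at the plateau
theorem pvStarts_gen (d : Int) (k : Nat) (rem : List Int)
    (hhead : ∀ d' r', rem = d' :: r' → d < d') :
    (PySem.List.pyRange 0 ((k : Int) + 1 + (rem.length : Int)) 1).filter
        (pvStartPred (List.replicate (k + 1) d ++ pvPrefL rem))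
      = 0 :: ((PySem.List.pyRange 0 ((rem.length : Int)) 1).filter
            (pvStartPred (pvPrefL rem))).map (· + ((k : Int) + 1)) := by
  rw [PySem.List.pyRange_one_cons (by omega)]
  rw [List.filter_cons_of_pos (by simp [pvStartPred])]
  congr 1
  simp only [zero_add]
  rw [PySem.List.pyRange_one_append 1 ((k : Int) + 1) ((k : Int) + 1 + (rem.length : Int))
      (by omega) (by omega), List.filter_append]
  have hleft : (PySem.List.pyRange 1 ((k : Int) + 1) 1).filter
      (pvStartPred (List.replicate (k + 1) d ++ pvPrefL rem)) = [] := by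
    rw [List.filter_eq_nil_iff]
    intro i hi
    rw [PySem.List.mem_pyRange_one] at hi
    simp only [pvStartPred, Bool.not_eq_true, Bool.or_eq_false_iff]
    refine ⟨by simp; omega, ?_⟩
    rw [pvIdx_left d k (pvPrefL rem) i (by omega) (by omega),
        pvIdx_left d k (pvPrefL rem) (i - 1) (by omega) (by omega)]
    simp
  rw [hleft, List.nil_append]
  rcases rem with _ | ⟨d', r'⟩
  · simp [PySem.List.pyRange_one_eq_nil]
  · have hd' : d < d' := hhead d' r' rfl
    rw [show pvPrefL (d' :: r') = d' :: pvScan d' r' from rfl]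
    rw [PySem.List.pyRange_one ((k : Int) + 1), PySem.List.pyRange_zero]
    rw [show ((k : Int) + 1 + ((d' :: r').length : Int) - ((k : Int) + 1)).toNat
        = (d' :: r').length by omega]
    rw [show (((d' :: r').length : Int)).toNat = (d' :: r').length by omega]
    simp only [List.filter_map, List.map_map]
    have hfilt : List.filter
          (pvStartPred (List.replicate (k + 1) d ++ (d' :: pvScan d' r')) ∘ fun (j : Nat) => (k : Int) + 1 + (j : Int))
          (List.range (d' :: r').length)
        = List.filter (pvStartPred (d' :: pvScan d' r') ∘ fun (j : Nat) => (j : Int))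
            (List.range (d' :: r').length) := by
      apply List.filter_congr
      intro j hjr
      have hjlt : j < (d' :: r').length := List.mem_range.mp hjr
      have hjt : j < (d' :: pvScan d' r').length := by
        simp only [List.length_cons, pvScan_length] at *
        omega
      simp only [Function.comp_apply]
      exact pvPred_shift d k d' (pvScan d' r') hd' j hjt
    rw [hfilt]
    apply List.map_congr_left
    intro j _
    simp only [Function.comp_apply]
    ring

-- the boundary-index filter, decomposed along A's first group
theorem pvStarts_cons (d : Int) (rest : List Int) :
    (PySem.List.pyRange 0 (((d :: rest).length : Int)) 1).filter
        (pvStartPred (pvPrefL (d :: rest)))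
      = 0 :: ((PySem.List.pyRange 0 (((rest.dropWhile (fun x => decide (x ≤ d))).length : Int)) 1).filter
            (pvStartPred (pvPrefL (rest.dropWhile (fun x => decide (x ≤ d)))))).map
          (· + ((rest.takeWhile (fun x => decide (x ≤ d))).length + 1 : Int)) := by
  have hlen : rest.length = (rest.takeWhile (fun x => decide (x ≤ d))).length
      + (rest.dropWhile (fun x => decide (x ≤ d))).length := by
    rw [← List.length_append, List.takeWhile_append_dropWhile]
  have hpref : pvPrefL (d :: rest)
      = List.replicate ((rest.takeWhile (fun x => decide (x ≤ d))).length + 1) d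
        ++ pvPrefL (rest.dropWhile (fun x => decide (x ≤ d))) := by
    rw [pvPrefL_cons d rest, List.replicate_succ, List.cons_append]
  have hn : (((d :: rest).length : Int))
      = ((rest.takeWhile (fun x => decide (x ≤ d))).length : Int) + 1
        + ((rest.dropWhile (fun x => decide (x ≤ d))).length : Int) := by
    simp [hlen]; ring
  have hhead : ∀ d' r', rest.dropWhile (fun x => decide (x ≤ d)) = d' :: r' → d < d' := by
    intro d' r' h
    have := List.head?_dropWhile_not (fun x => decide (x ≤ d)) rest
    rw [h] at this
    simp at this
    omega
  rw [hpref, hn]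
  exact pvStarts_gen d _ _ hhead

-- group sizes as successive differences
def pvDiffs (l : List Int) : List Int := (l.zip l.tail).map (fun ab => ab.2 - ab.1)

theorem pvDiffs_cons_cons (x y : Int) (r : List Int) :
    pvDiffs (x :: y :: r) = (y - x) :: pvDiffs (y :: r) := rfl

theorem pvDiffs_map_add (c : Int) : ∀ (l : List Int), pvDiffs (l.map (· + c)) = pvDiffs l := by
  intro l
  induction l with
  | nil => rfl
  | cons a l ih =>
    cases l with
    | nil => rfl
    | cons b t =>
      simp only [List.map_cons] at *
      rw [pvDiffs_cons_cons, pvDiffs_cons_cons]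
      rw [ih]
      congr 1
      ring

-- B's whole staged pipeline, as a function of the day list
def pvPipe (days : List Int) : List Int :=
  pvDiffs ((PySem.List.pyRange 0 ((days.length : Int)) 1).filter (pvStartPred (pvPrefL days))
           ++ [((days.length : Int))])

theorem pvAlt_eq_pipe (progresses speeds : List Int) :
    solution_alt progresses speeds = pvPipe (pvDaysB progresses speeds) := by
  unfold solution_alt pvPipe pvDiffs
  simp only [pvPref_eq_prefL, PySem.List.len_eq, PySem.List.slice_from_one]

-- main induction: the pipeline over any day list equals A's queue grouping
theorem pvPipe_eq_outer : ∀ (n : Nat) (days : List Int), days.length ≤ n →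
    pvPipe days = pvOuterA days := by
  intro n
  induction n with
  | zero =>
    intro days h
    have : days = [] := by cases days <;> simp_all
    subst this
    simp only [pvOuterA]
    decide
  | succ n ih =>
    intro days h
    cases days with
    | nil =>
      simp only [pvOuterA]
      decide
    | cons d rest =>
      have houter : pvOuterA (d :: rest)
          = (1 + ((rest.takeWhile (fun x => decide (x ≤ d))).length : Int))
            :: pvOuterA (rest.dropWhile (fun x => decide (x ≤ d))) := by
        rw [pvOuterA]
        rw [pvInner_spec]
      have hremle : (rest.dropWhile (fun x => decide (x ≤ d))).length ≤ n := by
        have := List.length_dropWhile_le (p := fun x => decide (x ≤ d)) (l := rest)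
        simp at h
        omega
      have hlen : rest.length = (rest.takeWhile (fun x => decide (x ≤ d))).length
          + (rest.dropWhile (fun x => decide (x ≤ d))).length := by
        rw [← List.length_append, List.takeWhile_append_dropWhile]
      rw [houter, ← ih _ hremle]
      unfold pvPipe
      rw [pvStarts_cons d rest]
      by_cases hremnil : rest.dropWhile (fun x => decide (x ≤ d)) = []
      · rw [hremnil]
        have hnval : (((d :: rest).length : Int))
            = (0 : Int) + (((rest.takeWhile (fun x => decide (x ≤ d))).length : Int) + 1) := by
          rw [hremnil] at hlen
          simp [hlen]
        rw [hnval]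
        simp only [List.length_nil, Nat.cast_zero,
          PySem.List.pyRange_one_eq_nil (le_refl (0 : Int)), List.filter_nil,
          List.map_nil, List.nil_append, zero_add]
        rw [List.singleton_append, pvDiffs_cons_cons]
        simp only [pvDiffs, List.tail_cons, List.zip_nil_right, List.map_nil]
        congr 1
        omega
      · -- rem nonempty: its boundary list begins with 0
        have hpos : (0 : Int) < ((rest.dropWhile (fun x => decide (x ≤ d))).length : Int) := by
          have : 0 < (rest.dropWhile (fun x => decide (x ≤ d))).length :=
            List.length_pos_iff.mpr hremnil
          omega
        have hstart : (PySem.List.pyRange 0 (((rest.dropWhile (fun x => decide (x ≤ d))).length : Int)) 1).filter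
              (pvStartPred (pvPrefL (rest.dropWhile (fun x => decide (x ≤ d)))))
            = 0 :: ((PySem.List.pyRange 1 (((rest.dropWhile (fun x => decide (x ≤ d))).length : Int)) 1).filter
              (pvStartPred (pvPrefL (rest.dropWhile (fun x => decide (x ≤ d)))))) := by
          rw [PySem.List.pyRange_one_cons hpos]
          rw [List.filter_cons_of_pos (by simp [pvStartPred])]
          simp only [zero_add]
        have hnval : (((d :: rest).length : Int))
            = (((rest.dropWhile (fun x => decide (x ≤ d))).length : Int))
              + (((rest.takeWhile (fun x => decide (x ≤ d))).length : Int) + 1) := by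
          simp [hlen]; ring
        rw [hstart, hnval]
        set c : Int := ((rest.takeWhile (fun x => decide (x ≤ d))).length : Int) + 1 with hc
        set s' := (PySem.List.pyRange 1 (((rest.dropWhile (fun x => decide (x ≤ d))).length : Int)) 1).filter
            (pvStartPred (pvPrefL (rest.dropWhile (fun x => decide (x ≤ d))))) with hs'
        set L : Int := ((rest.dropWhile (fun x => decide (x ≤ d))).length : Int) with hL
        have hform : (0 : Int) :: ((0 :: s').map (· + c)) ++ [L + c]
            = (0 : Int) :: ((0 :: (s' ++ [L])).map (· + c)) := by
          simp
        rw [hform]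
        have hstep : pvDiffs ((0 : Int) :: ((0 :: (s' ++ [L])).map (· + c)))
            = c :: pvDiffs (0 :: (s' ++ [L])) := by
          simp only [List.map_cons, zero_add]
          rw [pvDiffs_cons_cons]
          have h2 : pvDiffs (c :: (s' ++ [L]).map (· + c))
              = pvDiffs ((0 :: (s' ++ [L])).map (· + c)) := by
            simp
          rw [h2, pvDiffs_map_add]
          simp
        rw [hstep]
        have htail : (0 : Int) :: (s' ++ [L])
            = ((PySem.List.pyRange 0 L 1).filter
                (pvStartPred (pvPrefL (rest.dropWhile (fun x => decide (x ≤ d)))))) ++ [L] := by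
          rw [hstart]
          rfl
        rw [htail]
        congr 1
        · rw [hc]
          ring
        · rw [hstart]

-- ===== VERDICT (by name: the statement is the Claim_ definition above) =====
theorem solution_spec : Claim_equal_solution := by
  intro progresses speeds _ hpre
  obtain ⟨hlen, hnz⟩ := hpre
  unfold Spec_solution solution
  rw [pvRemains_eq_days progresses speeds hlen hnz, pvAlt_eq_pipe,
      pvPipe_eq_outer (pvDaysB progresses speeds).length _ le_rfl]
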